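-- pv_equiv track=rewrite | github.com/LukhasAI/Lukhas | tools/analysis/circular_dependency_analysis.py | _suggest_interface_name
-- ===== SOURCE A (Python) =====
-- def _suggest_interface_name(cycle: list[str]) -> str:
--     """Suggest interface module name based on cycle"""
--     # Find common prefix
--     parts = [module.split(".") for module in cycle]
--     common_prefix = []
--
--     for i in range(min(len(p) for p in parts)):
--         if all(p[i] == parts[0][i] for p in parts):
--             common_prefix.append(parts[0][i])
--         else:
--             break
--
--     if common_prefix:
--         return f"{'.'.join(common_prefix)}_interface"
--     else:
--         return "common_interface"
-- ===== SOURCE B (Python) =====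
-- def _lcp(a, b):
--     out = []
--     for x, y in zip(a, b):
--         if x != y:
--             break
--         out.append(x)
--     return out
--
--
-- def _suggest_interface_name(cycle: list[str]) -> str:
--     parts = [module.split(".") for module in cycle]
--     common = parts[0]
--     for p in parts[1:]:
--         common = _lcp(common, p)
--     return f"{'.'.join(common)}_interface" if common else "common_interface"
-- ===== Notes on version B (the rewrite author's own statement) =====
-- stated objective: simpler
-- what changed: Replaces the column-indexed loop over range(min length) with a pairwise fold of a binary longest-common-prefix over the split part-lists, removing the min() pass and all indexing.
import Mathlib
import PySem

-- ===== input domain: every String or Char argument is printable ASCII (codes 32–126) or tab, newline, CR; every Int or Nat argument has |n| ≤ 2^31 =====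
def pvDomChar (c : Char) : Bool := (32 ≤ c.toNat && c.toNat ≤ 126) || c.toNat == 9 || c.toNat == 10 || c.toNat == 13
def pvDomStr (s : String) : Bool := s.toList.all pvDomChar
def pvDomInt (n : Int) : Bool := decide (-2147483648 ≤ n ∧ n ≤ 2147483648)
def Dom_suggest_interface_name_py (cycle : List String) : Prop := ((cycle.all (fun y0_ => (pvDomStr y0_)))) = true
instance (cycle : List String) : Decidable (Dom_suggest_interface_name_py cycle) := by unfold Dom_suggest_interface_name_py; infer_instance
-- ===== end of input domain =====

-- B replaces A's column-indexed loop by a pairwise fold of a binary longest-common-prefix (simpler decomposition, same cost).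

-- ===== PORT A =====
-- the for-i loop with its break: at each i < n check all(p[i] == parts[0][i]); indexing is
-- always in range (i < min length), ported via getD (exact there)
def pvALoop (parts : List (List String)) (p0 : List String) (n : Nat) (i : Nat)
    (acc : List String) : List String :=
  if _h : i < n then
    if parts.all (fun p => (p.getD i "") == (p0.getD i "")) then
      pvALoop parts p0 n (i + 1) (acc ++ [p0.getD i ""])
    else acc
  else acc
termination_by n - i

def suggest_interface_name_py (cycle : List String) : String :=
  let parts := cycle.map (fun m => (PySem.Str.split? m ".").getD [])
  match PySem.List.min? (parts.map List.length) (fun x => x) with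
  | none => ""   -- Python: min() of an empty generator raises ValueError; excluded by Pre_
  | some n =>
    let common_prefix := pvALoop parts (parts.headD []) n 0 []
    if common_prefix ≠ [] then PySem.Str.join "." common_prefix ++ "_interface"
    else "common_interface"

-- ===== PORT B =====
-- binary longest common prefix: the zip walk with break of Source B's _lcp
def pvLcp (a b : List String) : List String :=
  match a, b with
  | x :: xs, y :: ys => if x == y then x :: pvLcp xs ys else []
  | _, _ => []

def suggest_interface_name_py_alt (cycle : List String) : String :=
  match cycle.map (fun m => (PySem.Str.split? m ".").getD []) with
  | [] => ""   -- Python: parts[0] raises IndexError; excluded by Pre_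
  | p0 :: rest =>
    let common := rest.foldl pvLcp p0
    if common ≠ [] then PySem.Str.join "." common ++ "_interface"
    else "common_interface"

-- ===== PRECONDITION & SPEC =====
-- A raises ValueError (min of an empty sequence) on the empty list; Pre_ excludes exactly that input.
def Pre_suggest_interface_name_py (cycle : List String) : Prop := cycle ≠ []
instance (cycle : List String) : Decidable (Pre_suggest_interface_name_py cycle) := by unfold Pre_suggest_interface_name_py; infer_instance
def pvWitness_suggest_interface_name_py : List String := ["a.b.c", "a.b.d"]

def Spec_suggest_interface_name_py (cycle : List String) (out : String) : Prop := out = suggest_interface_name_py_alt cycle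
instance (cycle : List String) (out : String) : Decidable (Spec_suggest_interface_name_py cycle out) := by unfold Spec_suggest_interface_name_py; infer_instance

-- ===== CLAIM (what is proved, stated in full; the proofs are below) =====
def Claim_equal_suggest_interface_name_py : Prop := ∀ (cycle : List String), Dom_suggest_interface_name_py cycle → Pre_suggest_interface_name_py cycle → Spec_suggest_interface_name_py cycle (suggest_interface_name_py cycle)

-- ===== LEMMAS AND PROOFS =====

theorem pvLcp_prefix_left (a b : List String) : pvLcp a b <+: a := by
  induction a generalizing b with
  | nil => cases b <;> simp [pvLcp]
  | cons x xs ih =>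
    cases b with
    | nil => simp [pvLcp]
    | cons y ys =>
      by_cases h : x == y
      · simp [pvLcp, h]; exact ih ys
      · simp [pvLcp, h]

theorem pvLcp_prefix_right (a b : List String) : pvLcp a b <+: b := by
  induction a generalizing b with
  | nil => cases b <;> simp [pvLcp]
  | cons x xs ih =>
    cases b with
    | nil => simp [pvLcp]
    | cons y ys =>
      by_cases h : x == y
      · have hxy : x = y := by simpa using h
        subst hxy
        simp [pvLcp]; exact ih ys
      · simp [pvLcp, h]

theorem pvLcp_max (a b : List String)
    (ha : (pvLcp a b).length < a.length) (hb : (pvLcp a b).length < b.length) :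
    a.getD (pvLcp a b).length "" ≠ b.getD (pvLcp a b).length "" := by
  induction a generalizing b with
  | nil => simp [pvLcp] at ha
  | cons x xs ih =>
    cases b with
    | nil => simp [pvLcp] at hb
    | cons y ys =>
      by_cases h : x == y
      · have hxy : x = y := by simpa using h
        subst hxy
        simp only [pvLcp, h, if_pos] at *
        simpa using ih ys (by simpa using ha) (by simpa using hb)
      · have hxy : x ≠ y := by simpa using h
        simpa [pvLcp, h] using hxy

-- getD through a prefix
theorem prefix_getD {a b : List String} (h : a <+: b) {i : Nat} (hi : i < a.length) :
    b.getD i "" = a.getD i "" := by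
  obtain ⟨t, rfl⟩ := h
  simp [List.getD, List.getElem?_append_left hi]

theorem foldl_lcp_prefix (rest : List (List String)) (acc : List String) :
    (rest.foldl pvLcp acc <+: acc) ∧ ∀ p ∈ rest, rest.foldl pvLcp acc <+: p := by
  induction rest generalizing acc with
  | nil => simp
  | cons r rs ih =>
    have h := ih (pvLcp acc r)
    refine ⟨h.1.trans (pvLcp_prefix_left acc r), ?_⟩
    intro p hp
    rcases List.mem_cons.mp hp with rfl | h'
    · exact h.1.trans (pvLcp_prefix_right acc p)
    · exact h.2 p h'

theorem foldl_lcp_max (rest : List (List String)) (acc : List String)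
    (h1 : (rest.foldl pvLcp acc).length < acc.length)
    (h2 : ∀ p ∈ rest, (rest.foldl pvLcp acc).length < p.length) :
    ∃ p ∈ rest, p.getD (rest.foldl pvLcp acc).length "" ≠ acc.getD (rest.foldl pvLcp acc).length "" := by
  induction rest generalizing acc with
  | nil => simp at h1
  | cons r rs ih =>
    simp only [List.foldl_cons] at *
    set L := rs.foldl pvLcp (pvLcp acc r) with hL
    have hpre := foldl_lcp_prefix rs (pvLcp acc r)
    by_cases hlt : L.length < (pvLcp acc r).length
    · obtain ⟨p, hp, hne⟩ := ih (pvLcp acc r) hlt (fun p hp => h2 p (by simp [hp]))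
      refine ⟨p, by simp [hp], ?_⟩
      rw [prefix_getD (pvLcp_prefix_left acc r) hlt]
      exact hne
    · have hle : L.length ≤ (pvLcp acc r).length := (List.IsPrefix.length_le hpre.1)
      have heq : L = pvLcp acc r := List.IsPrefix.eq_of_length hpre.1 (le_antisymm hle (le_of_not_gt hlt))
      have hr : L.length < r.length := h2 r (by simp)
      refine ⟨r, by simp, ?_⟩
      rw [heq] at h1 hr ⊢
      exact fun hcontra => pvLcp_max acc r h1 hr hcontra.symm

theorem pvALoop_char (parts : List (List String)) (p0 : List String) (n : Nat) (L : List String)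
    (hLn : L.length ≤ n)
    (hagree : ∀ j < L.length, ∀ p ∈ parts, p.getD j "" = p0.getD j "")
    (hL0 : ∀ j < L.length, p0.getD j "" = L.getD j "")
    (hstop : L.length < n → ∃ p ∈ parts, p.getD L.length "" ≠ p0.getD L.length "") :
    ∀ i acc, i ≤ L.length → pvALoop parts p0 n i acc = acc ++ L.drop i := by
  intro i acc hi
  induction hk : L.length - i generalizing i acc with
  | zero =>
    have hiL : i = L.length := by omega
    subst hiL
    rw [pvALoop]
    split_ifs with h1 h2
    · exfalso
      obtain ⟨p, hp, hne⟩ := hstop h1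
      have := List.all_eq_true.mp h2 p hp
      exact hne (by simpa using this)
    · simp
    · simp
  | succ k ih =>
    have hiL : i < L.length := by omega
    rw [pvALoop]
    have hin : i < n := lt_of_lt_of_le hiL hLn
    have hall : parts.all (fun p => (p.getD i "") == (p0.getD i "")) = true := by
      apply List.all_eq_true.mpr
      intro p hp
      simpa using hagree i hiL p hp
    rw [dif_pos hin, if_pos hall, ih (i + 1) _ (by omega) (by omega)]
    rw [hL0 i hiL]
    have hdrop : L.drop i = L.getD i "" :: L.drop (i + 1) := by
      rw [List.drop_eq_getElem_cons hiL]
      simp [List.getD, List.getElem?_eq_getElem hiL]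
    rw [hdrop]
    simp

-- ===== VERDICT (by name: the statement is the Claim_ definition above) =====
theorem suggest_interface_name_py_spec : Claim_equal_suggest_interface_name_py := by
  intro cycle _ hpre
  unfold Spec_suggest_interface_name_py
  cases cycle with
  | nil => exact absurd rfl hpre
  | cons c cs =>
    unfold suggest_interface_name_py suggest_interface_name_py_alt
    simp only [List.map_cons]
    set p0 := (PySem.Str.split? c ".").getD [] with hp0
    set rest := cs.map (fun m => (PySem.Str.split? m ".").getD []) with hrest
    set parts := p0 :: rest with hparts
    set L := rest.foldl pvLcp p0 with hLdef
    obtain ⟨n, hn⟩ : ∃ n, PySem.List.min? ((p0 :: rest).map List.length) (fun x => x) = some n := by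
      cases hmin : PySem.List.min? ((p0 :: rest).map List.length) (fun x => x) with
      | none => simp [PySem.List.min?_eq_none_iff] at hmin
      | some n => exact ⟨n, rfl⟩
    have hmem : n ∈ (p0 :: rest).map List.length := PySem.List.min?_mem hn
    have hmin : ∀ y ∈ (p0 :: rest).map List.length, n ≤ y := PySem.List.min?_isMin hn
    have hLpre : ∀ p ∈ parts, L <+: p := by
      intro p hp
      have h := foldl_lcp_prefix rest p0
      rcases List.mem_cons.mp hp with rfl | h'
      · exact h.1
      · exact h.2 p h'
    have hLn : L.length ≤ n := by
      obtain ⟨p, hp, hlen⟩ := List.mem_map.mp hmem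
      calc L.length ≤ p.length := (hLpre p hp).length_le
        _ = n := hlen
    have hagree : ∀ j < L.length, ∀ p ∈ parts, p.getD j "" = p0.getD j "" := by
      intro j hj p hp
      rw [prefix_getD (hLpre p hp) hj, prefix_getD (hLpre p0 (by simp [hparts])) hj]
    have hL0 : ∀ j < L.length, p0.getD j "" = L.getD j "" := fun j hj =>
      prefix_getD (hLpre p0 (by simp [hparts])) hj
    have hstop : L.length < n → ∃ p ∈ parts, p.getD L.length "" ≠ p0.getD L.length "" := by
      intro hlt
      have h1 : L.length < p0.length := lt_of_lt_of_le hlt (hmin _ (by simp))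
      have h2 : ∀ p ∈ rest, L.length < p.length := fun p hp =>
        lt_of_lt_of_le hlt (hmin _ (List.mem_map.mpr ⟨p, by simp [hp], rfl⟩))
      obtain ⟨p, hp, hne⟩ := foldl_lcp_max rest p0 h1 h2
      exact ⟨p, by simp [hparts, hp], hne⟩
    have hloop := pvALoop_char parts p0 n L hLn hagree hL0 hstop 0 [] (Nat.zero_le _)
    simp only [List.nil_append, List.drop_zero] at hloop
    have hn' := hn
    simp only [List.map_cons] at hn'
    simp only [hparts, List.headD_cons]
    rw [hparts] at hloop
    simp only [hn']
    rw [hloop]
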